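-- pv_equiv track=rewrite | github.com/StephanHolgerD/DrukBam | DrukBam/bamCalc.py | SolveFlag
-- ===== SOURCE A (Python) =====
-- def SolveFlag(flag):
--     allFlags=[1,2,4,8,16,32,64,128,256,512,1048]
--     def OneLess(remainer,pot,FoundFlags=None):
--         if FoundFlags is None:
--             FoundFlags=[]
--         if remainer ==0:
--             return FoundFlags
--         potF=[]
--         for f in pot:
--             if f == remainer:
--                 FoundFlags.append(f)
--                 return FoundFlags
--             if f<remainer:
--                 potF.append(f)
--         remainer=remainer-max(potF)
--         FoundFlags.append(max(potF))
--         potF.remove(max(potF))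
--         if remainer == 0:
--             return FoundFlags
--         else:
--             FoundFlags=OneLess(remainer,potF,FoundFlags)
--             return FoundFlags
--     return OneLess(flag,allFlags)
-- ===== SOURCE B (Python) =====
-- def SolveFlag(flag):
--     out = []
--     r = flag
--     if r >= 1048:
--         out.append(1048)
--         r -= 1048
--     for b in range(9, -1, -1):
--         p = 2 ** b
--         if (r // p) % 2:
--             out.append(p)
--     return out
-- ===== Notes on version B (the rewrite author's own statement) =====
-- stated objective: simpler
-- what changed: Replaces the recursive greedy search over a shrinking candidate list with a direct bit decomposition: peel off 1048 if present, then read the remaining value's binary digits from 512 down to 1.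
-- outside the precondition, e.g. on SolveFlag(1024): A raises ValueError, B returns []; on SolveFlag(-1): A raises ValueError, B returns [512, 256, 128, 64, 32, 16, 8, 4, 2, 1]
import Mathlib
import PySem

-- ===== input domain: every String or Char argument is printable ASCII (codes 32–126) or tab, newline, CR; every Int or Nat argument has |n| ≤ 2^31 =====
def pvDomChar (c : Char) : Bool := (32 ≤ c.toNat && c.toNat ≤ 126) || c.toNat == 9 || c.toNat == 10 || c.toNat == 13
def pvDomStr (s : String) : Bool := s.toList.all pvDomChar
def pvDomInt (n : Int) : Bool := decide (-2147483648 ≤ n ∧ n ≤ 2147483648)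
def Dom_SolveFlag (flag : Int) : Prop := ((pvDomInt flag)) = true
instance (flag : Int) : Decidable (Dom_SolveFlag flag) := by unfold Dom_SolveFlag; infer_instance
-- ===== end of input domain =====

-- B replaces A's recursive greedy search over a shrinking flag list by a direct
-- bit decomposition (peel 1048, then binary digits 512..1); objective: simpler.


-- ===== PORT A =====
-- the 'for f in pot' loop: early return (.inl f) when f == remainer, else collect f < remainer
def pvScanPot : List Int → Int → Sum Int (List Int)
  | [], _ => .inr []
  | f :: rest, remainer =>
    if f = remainer then .inl f
    else if f < remainer then
      match pvScanPot rest remainer with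
      | .inl g => .inl g
      | .inr potF => .inr (f :: potF)
    else pvScanPot rest remainer

-- OneLess; 'max(potF)' on an empty list raises ValueError in Python → none here.
-- The extra 'fuel' argument only totalizes the recursion (each call strictly
-- shrinks pot, so fuel = |pot| + 1 is never exhausted); it changes nothing else.
def pvOneLess : Nat → Int → List Int → List Int → Option (List Int)
  | 0, _, _, _ => none
  | fuel + 1, remainer, pot, foundFlags =>
    if remainer = 0 then some foundFlags
    else
      match pvScanPot pot remainer with
      | .inl f => some (foundFlags ++ [f])
      | .inr potF =>
        match PySem.List.max? potF (fun x => x) with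
        | none => none          -- ValueError: max() arg is an empty sequence
        | some m =>
          let remainer' := remainer - m
          let foundFlags' := foundFlags ++ [m]
          match PySem.List.remove? potF m with
          | none => none        -- unreachable: m ∈ potF
          | some potF' =>
            if remainer' = 0 then some foundFlags'
            else pvOneLess fuel remainer' potF' foundFlags'

def SolveFlag (flag : Int) : List Int :=
  ((pvOneLess 12 flag [1,2,4,8,16,32,64,128,256,512,1048] []).getD [])
  -- .getD []: inside Pre_SolveFlag pvOneLess never returns none (Python would raise ValueError there)

-- ===== PORT B =====
def SolveFlag_alt (flag : Int) : List Int :=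
  let st : List Int × Int := if flag ≥ 1048 then ([(1048:Int)], flag - 1048) else ([], flag)
  let out := st.1
  let r := st.2
  (PySem.List.pyRange 9 (-1) (-1)).foldl (fun out b =>
    let p : Int := 2 ^ b.toNat      -- 2 ** b; b ∈ 0..9 so toNat is exact
    if PySem.Int.mod (PySem.Int.floordiv r p) 2 ≠ 0 then out ++ [p] else out) out

-- ===== PRECONDITION & SPEC =====
-- Pre_ excludes exactly the inputs where A raises ValueError (max() of an empty
-- candidate list): negative flags and flags in [1024,1047] or above 2071, which
-- no subset of the fixed flag list sums to.
def Pre_SolveFlag (flag : Int) : Prop :=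
  (0 ≤ flag ∧ flag ≤ 1023) ∨ (1048 ≤ flag ∧ flag ≤ 2071)
instance (flag : Int) : Decidable (Pre_SolveFlag flag) := by unfold Pre_SolveFlag; infer_instance
def pvWitness_SolveFlag : Int := (1050)

def Spec_SolveFlag (flag : Int) (out : List Int) : Prop := out = SolveFlag_alt flag
instance (flag : Int) (out : List Int) : Decidable (Spec_SolveFlag flag out) := by unfold Spec_SolveFlag; infer_instance

-- ===== CLAIM (what is proved, stated in full; the proofs are below) =====
def Claim_equal_SolveFlag : Prop := ∀ (flag : Int), Dom_SolveFlag flag → Pre_SolveFlag flag → Spec_SolveFlag flag (SolveFlag flag)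

-- ===== LEMMAS AND PROOFS =====
set_option maxHeartbeats 4000000 in
set_option maxRecDepth 100000 in
theorem pvAll_small : ∀ n : Nat, n < 2072 → Pre_SolveFlag (n : Int) → SolveFlag (n : Int) = SolveFlag_alt (n : Int) := by decide

-- ===== VERDICT (by name: the statement is the Claim_ definition above) =====
theorem SolveFlag_spec : Claim_equal_SolveFlag := by
  intro flag _ hpre
  unfold Spec_SolveFlag
  have h0 : 0 ≤ flag := by rcases hpre with ⟨h, _⟩ | ⟨h, _⟩ <;> omega
  have hlt : flag.toNat < 2072 := by rcases hpre with ⟨_, h⟩ | ⟨_, h⟩ <;> omega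
  have := pvAll_small flag.toNat hlt (by rwa [Int.toNat_of_nonneg h0])
  rwa [Int.toNat_of_nonneg h0] at this
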